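-- pv_equiv track=rewrite | github.com/s102345/FB_post_analyst | modules/ShareProcess.py | shareProcess
-- ===== SOURCE A (Python) =====
-- def shareProcess(shareText):
--     shareAmount = ""
--     shareText = str(shareText)
--     scriptFlag = False
--
--     #處理網頁標籤
--     for i in range(0, len(shareText)):
--             #Priority 1 '<'
--             if shareText[i] == '<':
--                 scriptFlag = True
--
--             #Priority 2 '>'
--             elif shareText[i] == '>':
--                 scriptFlag = False
--
--             #Priority 3 isIn "<>"
--             elif scriptFlag:
--                 pass
--
--             #Infomation collect
--             else:
--                 shareAmount += shareText[i]
--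
--     #取出數字
--     strTemp = ""
--     for i in range(0, len(shareAmount)):
--         if shareAmount[i] <= '9' and shareAmount[i] >= '0':
--             strTemp += shareAmount[i]
--
--     shareAmount = strTemp
--     return shareAmount
-- ===== SOURCE B (Python) =====
-- def shareProcess(shareText):
--     shareText = str(shareText)
--     result = []
--     inTag = False
--     for c in shareText:
--         if c == '<':
--             inTag = True
--         elif c == '>':
--             inTag = False
--         elif not inTag and '0' <= c <= '9':
--             result.append(c)
--     return ''.join(result)
-- ===== Notes on version B (the rewrite author's own statement) =====
-- stated objective: simpler
-- what changed: B fuses A's two sequential passes (strip tags into an intermediate string, then filter digits) into one single traversal with the digit test inside the non-tag branch, accumulating into a list joined once.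
import Mathlib
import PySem

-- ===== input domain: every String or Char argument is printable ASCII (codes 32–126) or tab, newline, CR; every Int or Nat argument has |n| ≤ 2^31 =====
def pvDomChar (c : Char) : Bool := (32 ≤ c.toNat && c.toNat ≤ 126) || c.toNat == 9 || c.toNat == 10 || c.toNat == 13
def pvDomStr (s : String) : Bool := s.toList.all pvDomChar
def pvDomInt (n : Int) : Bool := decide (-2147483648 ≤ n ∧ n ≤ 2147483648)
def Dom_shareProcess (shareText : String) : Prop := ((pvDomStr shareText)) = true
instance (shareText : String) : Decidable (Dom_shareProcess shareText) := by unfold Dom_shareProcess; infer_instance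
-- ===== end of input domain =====

-- B fuses A's two passes (tag-strip then digit-filter) into one traversal; objective: simpler.

-- ===== PORT A =====
-- first loop of A: strip tags, tracking scriptFlag
def pvStripA (flag : Bool) : List Char → List Char
  | [] => []
  | c :: cs =>
    if c = '<' then pvStripA true cs
    else if c = '>' then pvStripA false cs
    else if flag then pvStripA flag cs
    else c :: pvStripA flag cs

-- second loop of A: keep characters with '0' ≤ c ≤ '9'
def pvDigitsA : List Char → List Char
  | [] => []
  | c :: cs => if c ≤ '9' ∧ '0' ≤ c then c :: pvDigitsA cs else pvDigitsA cs

def shareProcess (shareText : String) : String :=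
  String.ofList (pvDigitsA (pvStripA false shareText.toList))

-- ===== PORT B =====
-- single fused pass of B
def pvGoB (inTag : Bool) : List Char → List Char
  | [] => []
  | c :: cs =>
    if c = '<' then pvGoB true cs
    else if c = '>' then pvGoB false cs
    else if ¬ inTag ∧ '0' ≤ c ∧ c ≤ '9' then c :: pvGoB inTag cs
    else pvGoB inTag cs

def shareProcess_alt (shareText : String) : String :=
  String.ofList (pvGoB false shareText.toList)

-- ===== PRECONDITION & SPEC =====
def Spec_shareProcess (shareText : String) (out : String) : Prop := out = shareProcess_alt shareText
instance (shareText : String) (out : String) : Decidable (Spec_shareProcess shareText out) := by unfold Spec_shareProcess; infer_instance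

-- ===== CLAIM (what is proved, stated in full; the proofs are below) =====
def Claim_equal_shareProcess : Prop := ∀ (shareText : String), Dom_shareProcess shareText → Spec_shareProcess shareText (shareProcess shareText)

-- ===== LEMMAS AND PROOFS =====
theorem pvDigits_strip (flag : Bool) (cs : List Char) :
    pvDigitsA (pvStripA flag cs) = pvGoB flag cs := by
  induction cs generalizing flag with
  | nil => rfl
  | cons c cs ih =>
    simp only [pvStripA, pvGoB]
    by_cases h1 : c = '<'
    · simp [h1, ih]
    · by_cases h2 : c = '>'
      · simp [h2, ih]
      · cases flag with
        | true => simp [h2, ih]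
        | false =>
          by_cases hd : '0' ≤ c ∧ c ≤ '9'
          · simp [pvDigitsA, h1, h2, hd, ih]
          · have hd' : ¬(c ≤ '9' ∧ '0' ≤ c) := fun h => hd ⟨h.2, h.1⟩
            simp [pvDigitsA, h1, h2, hd, hd', ih]

-- ===== VERDICT (by name: the statement is the Claim_ definition above) =====
theorem shareProcess_spec : Claim_equal_shareProcess := by
  intro s _
  unfold Spec_shareProcess shareProcess shareProcess_alt
  rw [pvDigits_strip]
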